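-- pv_equiv track=rewrite | github.com/awslabs/cli-agent-orchestrator | src/cli_agent_orchestrator/utils/opencode_permissions.py | cao_tools_to_opencode_permission
-- ===== SOURCE A (Python) =====
-- from typing import Dict, List
--
-- ALL_OPENCODE_TOOLS: List[str] = [
--     "read",
--     "write",
--     "edit",
--     "glob",
--     "grep",
--     "bash",
--     "task",
--     "question",
--     "webfetch",
--     "websearch",
--     "codesearch",
--     "skill",
--     "todowrite",
-- ]
--
-- _CAO_CATEGORY_MAP: Dict[str, List[str]] = {
--     "execute_bash": ["bash"],
--     "fs_read": ["read"],
--     "fs_write": ["edit", "write"],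
--     "fs_list": ["glob", "grep"],
--     "fs_*": ["read", "edit", "write", "glob", "grep"],
-- }
--
-- _CAO_VOCABULARY_TOOLS: frozenset = frozenset(
--     tool for tools in _CAO_CATEGORY_MAP.values() for tool in tools
-- )
--
-- _HARDCODED_DENY: frozenset = frozenset(["task", "question", "webfetch", "websearch", "codesearch"])
--
-- _HARDCODED_ALLOW: frozenset = frozenset(["todowrite", "skill"])
--
-- def cao_tools_to_opencode_permission(
--     allowed_tools: List[str],
--     auto_approve: bool,
-- ) -> Dict[str, str]:
--     """Translate a CAO ``allowedTools`` list to an OpenCode ``permission:`` dict.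
--
--     Args:
--         allowed_tools: CAO-vocabulary tool list, e.g. ``["@builtin", "execute_bash"]``.
--         auto_approve: When ``True``, permitted tools get ``"allow"``; when
--             ``False``, they get ``"ask"`` (OpenCode prompts the user).
--
--     Returns:
--         A ``{tool_name: "allow"|"ask"|"deny"}`` dict covering all 13 OpenCode
--         built-in tools.  ``@<mcp-server>`` entries in ``allowed_tools`` are
--         silently skipped — they are handled via ``opencode.json`` agent tool gating
--         (see §6 of the design doc).
--     """
--     permit_value = "allow" if auto_approve else "ask"
--
--     # ── Step 1: shorthand expansion ──────────────────────────────────────────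
--     if "*" in allowed_tools:
--         # Unrestricted: every OpenCode tool → allow.
--         return {tool: "allow" for tool in ALL_OPENCODE_TOOLS}
--
--     expanded_categories: List[str] = []
--     for entry in allowed_tools:
--         if entry == "@builtin":
--             expanded_categories.extend(["execute_bash", "fs_read", "fs_write", "fs_list"])
--         elif entry.startswith("@"):
--             # MCP server reference — handled in opencode.json, not frontmatter.
--             continue
--         else:
--             expanded_categories.append(entry)
--
--     # ── Step 2: build the permission dict ────────────────────────────────────
--     # Collect all OpenCode tools that should be permitted.
--     permitted_tools: set = set()
--     for category in expanded_categories: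
--         if category in _CAO_CATEGORY_MAP:
--             permitted_tools.update(_CAO_CATEGORY_MAP[category])
--         # Unknown CAO categories are silently ignored.
--
--     result: Dict[str, str] = {}
--     for tool in ALL_OPENCODE_TOOLS:
--         if tool in _HARDCODED_DENY:
--             result[tool] = "deny"
--         elif tool in _HARDCODED_ALLOW:
--             result[tool] = "allow"
--         elif tool in permitted_tools:
--             result[tool] = permit_value
--         elif tool in _CAO_VOCABULARY_TOOLS:
--             # CAO-vocabulary tool that was not permitted → deny.
--             result[tool] = "deny"
--         else:
--             # A tool was added to ALL_OPENCODE_TOOLS without a policy — fail loudly.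
--             raise AssertionError(
--                 f"unhandled tool '{tool}': add it to _HARDCODED_DENY, _HARDCODED_ALLOW, "
--                 "or _CAO_CATEGORY_MAP in opencode_permissions.py"
--             )
--
--     return result
-- ===== SOURCE B (Python) =====
-- from typing import Dict, List
--
-- ALL_OPENCODE_TOOLS: List[str] = [
--     "read",
--     "write",
--     "edit",
--     "glob",
--     "grep",
--     "bash",
--     "task",
--     "question",
--     "webfetch",
--     "websearch",
--     "codesearch",
--     "skill",
--     "todowrite",
-- ]
--
-- _CAO_CATEGORY_MAP: Dict[str, List[str]] = {
--     "execute_bash": ["bash"],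
--     "fs_read": ["read"],
--     "fs_write": ["edit", "write"],
--     "fs_list": ["glob", "grep"],
--     "fs_*": ["read", "edit", "write", "glob", "grep"],
-- }
--
-- _HARDCODED_ALLOW_ORDERED = ("todowrite", "skill")
--
--
-- def cao_tools_to_opencode_permission(allowed_tools: List[str], auto_approve: bool) -> Dict[str, str]:
--     """Layered-override construction: start from an all-deny baseline over
--     ALL_OPENCODE_TOOLS, overwrite the tools permitted by each list entry, then
--     overwrite the hardcoded allows.  No @-prefix branch is needed: no CAO
--     category starts with '@', so '@<mcp-server>' entries map to no tools."""
--     if "*" in allowed_tools: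
--         return {tool: "allow" for tool in ALL_OPENCODE_TOOLS}
--     permit_value = "allow" if auto_approve else "ask"
--     result = {tool: "deny" for tool in ALL_OPENCODE_TOOLS}
--     for entry in allowed_tools:
--         categories = ["execute_bash", "fs_read", "fs_write", "fs_list"] if entry == "@builtin" else [entry]
--         for category in categories:
--             for tool in _CAO_CATEGORY_MAP.get(category, []):
--                 result[tool] = permit_value
--     for tool in _HARDCODED_ALLOW_ORDERED:
--         result[tool] = "allow"
--     return result
-- ===== Notes on version B (the rewrite author's own statement) =====
-- stated objective: simpler
-- what changed: B replaces A's final per-tool if/elif classification loop (and its AssertionError guard) with a layered-override dict: an all-deny baseline over ALL_OPENCODE_TOOLS, then overwriting the tools mapped by each allowed entry with the permit value, then overwriting the hardcoded allows, encoding A's precedence through application order; the @-prefix skip branch disappears since no CAO category starts with '@'.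
import Mathlib
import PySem

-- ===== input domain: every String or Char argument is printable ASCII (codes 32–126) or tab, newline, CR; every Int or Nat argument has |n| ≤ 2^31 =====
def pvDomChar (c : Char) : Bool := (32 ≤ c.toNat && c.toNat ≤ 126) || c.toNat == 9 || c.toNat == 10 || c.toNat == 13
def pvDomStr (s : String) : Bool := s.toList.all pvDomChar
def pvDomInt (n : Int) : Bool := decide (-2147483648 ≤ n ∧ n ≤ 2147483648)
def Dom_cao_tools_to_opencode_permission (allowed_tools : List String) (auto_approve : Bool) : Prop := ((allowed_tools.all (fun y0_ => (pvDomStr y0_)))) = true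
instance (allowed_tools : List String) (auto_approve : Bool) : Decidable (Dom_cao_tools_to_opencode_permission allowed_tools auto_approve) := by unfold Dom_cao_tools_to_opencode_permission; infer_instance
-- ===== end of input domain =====

-- B replaces A's final per-tool if/elif classification loop by a layered-override
-- construction (all-deny baseline, overwrite permitted tools, overwrite hardcoded
-- allows); objective: simpler.

-- ===== PORT A =====
-- module constants (shared verbatim by both Python modules)
def pvAllTools : List String :=
  ["read", "write", "edit", "glob", "grep", "bash", "task", "question",
   "webfetch", "websearch", "codesearch", "skill", "todowrite"]

def pvCatMap : PySem.Dict String (List String) :=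
  PySem.Dict.ofList
    [("execute_bash", ["bash"]),
     ("fs_read", ["read"]),
     ("fs_write", ["edit", "write"]),
     ("fs_list", ["glob", "grep"]),
     ("fs_*", ["read", "edit", "write", "glob", "grep"])]

def pvVocab : PySem.Set String := PySem.Set.ofList (pvCatMap.values.flatten)

def pvDeny : PySem.Set String :=
  PySem.Set.ofList ["task", "question", "webfetch", "websearch", "codesearch"]

def pvAllow : PySem.Set String := PySem.Set.ofList ["todowrite", "skill"]

-- Port of A.  The AssertionError branch is modelled by the Option state (none
-- = raise); it is unreachable — every tool of the literal `pvAllTools` is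
-- covered by pvDeny/pvAllow/pvVocab — so the final `.getD` is never taken.
def cao_tools_to_opencode_permission (allowed_tools : List String) (auto_approve : Bool) : List (String × String) :=
  let permit_value := if auto_approve then "allow" else "ask"
  if allowed_tools.contains "*" then
    (pvAllTools.foldl (fun (d : PySem.Dict String String) tool => d.insert tool "allow")
      PySem.Dict.empty).items
  else
    let expanded_categories : List String :=
      allowed_tools.foldl (fun acc entry =>
        if entry == "@builtin" then
          acc ++ ["execute_bash", "fs_read", "fs_write", "fs_list"]
        else if PySem.Str.startswith entry "@" then acc
        else acc ++ [entry]) []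
    let permitted_tools : PySem.Set String :=
      expanded_categories.foldl (fun s category =>
        match pvCatMap.get? category with
        | some ts => PySem.Set.update s ts
        | none => s) PySem.Set.empty
    let result : Option (PySem.Dict String String) :=
      pvAllTools.foldl (fun od tool =>
        match od with
        | none => none
        | some d =>
          if pvDeny.contains tool then some (d.insert tool "deny")
          else if pvAllow.contains tool then some (d.insert tool "allow")
          else if permitted_tools.contains tool then some (d.insert tool permit_value)
          else if pvVocab.contains tool then some (d.insert tool "deny")
          else none) (some PySem.Dict.empty)
    (result.getD PySem.Dict.empty).items

-- ===== PORT B =====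
def pvAllowOrdered : List String := ["todowrite", "skill"]

def cao_tools_to_opencode_permission_alt (allowed_tools : List String) (auto_approve : Bool) : List (String × String) :=
  if allowed_tools.contains "*" then
    (pvAllTools.foldl (fun (d : PySem.Dict String String) tool => d.insert tool "allow")
      PySem.Dict.empty).items
  else
    let permit_value := if auto_approve then "allow" else "ask"
    let result0 : PySem.Dict String String :=
      pvAllTools.foldl (fun (d : PySem.Dict String String) tool => d.insert tool "deny")
        PySem.Dict.empty
    let result1 : PySem.Dict String String :=
      allowed_tools.foldl (fun d entry =>
        let categories :=
          if entry == "@builtin" then ["execute_bash", "fs_read", "fs_write", "fs_list"]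
          else [entry]
        categories.foldl (fun d category =>
          (pvCatMap.getD category []).foldl
            (fun (d : PySem.Dict String String) tool => d.insert tool permit_value) d) d)
        result0
    (pvAllowOrdered.foldl (fun (d : PySem.Dict String String) tool => d.insert tool "allow")
      result1).items

-- ===== PRECONDITION & SPEC =====
def Spec_cao_tools_to_opencode_permission (allowed_tools : List String) (auto_approve : Bool) (out : List (String × String)) : Prop := out = cao_tools_to_opencode_permission_alt allowed_tools auto_approve
instance (allowed_tools : List String) (auto_approve : Bool) (out : List (String × String)) : Decidable (Spec_cao_tools_to_opencode_permission allowed_tools auto_approve out) := by unfold Spec_cao_tools_to_opencode_permission; infer_instance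

-- ===== CLAIM (what is proved, stated in full; the proofs are below) =====
def Claim_equal_cao_tools_to_opencode_permission : Prop := ∀ (allowed_tools : List String) (auto_approve : Bool), Dom_cao_tools_to_opencode_permission allowed_tools auto_approve → Spec_cao_tools_to_opencode_permission allowed_tools auto_approve (cao_tools_to_opencode_permission allowed_tools auto_approve)

-- ===== LEMMAS AND PROOFS =====

-- the OpenCode tools one entry ultimately permits (common abstraction of both ports)
def pvExpand (entry : String) : List String :=
  (if entry == "@builtin" then ["execute_bash", "fs_read", "fs_write", "fs_list"]
   else [entry]).flatMap (fun c => pvCatMap.getD c [])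

-- "tool is permitted by some entry of the list"
def pvPermitted (allowed_tools : List String) (tool : String) : Bool :=
  allowed_tools.any (fun e => (pvExpand e).contains tool)

theorem pvCatMap_items :
    pvCatMap.items =
      [("execute_bash", ["bash"]), ("fs_read", ["read"]), ("fs_write", ["edit", "write"]),
       ("fs_list", ["glob", "grep"]), ("fs_*", ["read", "edit", "write", "glob", "grep"])] := by
  decide

-- no CAO category starts with '@', so an '@…' entry never matches the map
theorem pvCatMap_at (e : String) (h : PySem.Str.startswith e "@" = true) :
    pvCatMap.get? e = none := by
  have h' : "@".toList <+: e.toList := by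
    simpa [PySem.Chars.startswith_iff] using h
  obtain ⟨t, ht⟩ := h'
  have hne : ∀ k : String, k.toList.head? ≠ some '@' → ¬ (k = e) := by
    intro k hk he; subst he; rw [← ht] at hk; simp at hk
  simp [PySem.Dict.get?, pvCatMap_items]
  refine ⟨?_, ?_, ?_, ?_, ?_⟩ <;> exact hne _ (by decide)

-- A's category list for one entry of allowed_tools
def pvCatsA (e : String) : List String :=
  if e == "@builtin" then ["execute_bash", "fs_read", "fs_write", "fs_list"]
  else if PySem.Str.startswith e "@" then []
  else [e]

theorem set_fold_mem (cats : List String) (s0 : PySem.Set String) (tool : String) :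
    (tool ∈ cats.foldl (fun s category =>
        match pvCatMap.get? category with
        | some ts => PySem.Set.update s ts
        | none => s) s0)
    ↔ tool ∈ s0 ∨ ∃ c ∈ cats, tool ∈ pvCatMap.getD c [] := by
  induction cats generalizing s0 with
  | nil => simp
  | cons c cs ih =>
    simp only [List.foldl_cons, ih]
    cases hc : pvCatMap.get? c with
    | none => simp [PySem.Dict.getD, hc]
    | some ts => simp [PySem.Dict.getD, hc, PySem.Set.mem_update]; tauto

-- A's permitted_tools set contains exactly the pvPermitted tools
theorem permitted_spec (ats : List String) (tool : String) :
    (PySem.Set.contains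
      ((ats.foldl (fun acc entry =>
          if entry == "@builtin" then
            acc ++ ["execute_bash", "fs_read", "fs_write", "fs_list"]
          else if PySem.Str.startswith entry "@" then acc
          else acc ++ [entry]) []).foldl (fun s category =>
            match pvCatMap.get? category with
            | some ts => PySem.Set.update s ts
            | none => s) PySem.Set.empty) tool) = pvPermitted ats tool := by
  have hstep : (fun (acc : List String) entry =>
          if entry == "@builtin" then
            acc ++ ["execute_bash", "fs_read", "fs_write", "fs_list"]
          else if PySem.Str.startswith entry "@" then acc
          else acc ++ [entry]) = fun acc e => acc ++ pvCatsA e := by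
    funext acc e; simp [pvCatsA]; split_ifs <;> simp
  rw [hstep, PySem.List.foldl_append_eq_flatMap, List.nil_append]
  rw [Bool.eq_iff_iff]
  simp only [PySem.Set.contains, List.contains_iff_mem, set_fold_mem, pvPermitted,
    List.any_eq_true, List.mem_flatMap, pvExpand]
  constructor
  · rintro (h | ⟨c, ⟨e, he, hc⟩, ht⟩)
    · simp [PySem.Set.empty] at h
    · refine ⟨e, he, ?_⟩
      simp only [pvCatsA] at hc
      split_ifs at hc with h1 h2
      · simp only [List.mem_cons, List.not_mem_nil, or_false] at hc
        rcases hc with rfl | rfl | rfl | rfl <;> exact ⟨_, by simp [h1], ht⟩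
      · exact absurd hc (List.not_mem_nil)
      · simp only [List.mem_singleton] at hc; subst hc
        refine ⟨c, ?_, ht⟩
        rw [if_neg h1]
        exact List.mem_singleton.mpr rfl
  · rintro ⟨e, he, hc⟩
    obtain ⟨c, hce, ht⟩ := hc
    right
    refine ⟨c, ⟨e, he, ?_⟩, ht⟩
    simp only [pvCatsA]
    split_ifs with h1 h2
    · rwa [if_pos h1] at hce
    · rw [if_neg h1] at hce
      simp only [List.mem_singleton] at hce; subst hce
      exact absurd ht (by simp [PySem.Dict.getD, pvCatMap_at c h2])
    · rw [if_neg h1] at hce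
      exact hce

theorem dict_contains_keys (d : PySem.Dict String String) (k : String) :
    d.contains k = d.keys.contains k := by
  rw [Bool.eq_iff_iff]
  simp only [PySem.Dict.contains, PySem.Dict.keys, List.any_eq_true, List.contains_iff_mem,
    List.mem_map, beq_iff_eq]

theorem pvGetD_sub (c t : String) (h : t ∈ pvCatMap.getD c []) : t ∈ pvAllTools := by
  simp only [PySem.Dict.getD, PySem.Dict.get?, pvCatMap_items] at h
  cases hf : List.find? (fun p => p.1 == c)
      [("execute_bash", ["bash"]), ("fs_read", ["read"]), ("fs_write", ["edit", "write"]),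
       ("fs_list", ["glob", "grep"]), ("fs_*", ["read", "edit", "write", "glob", "grep"])] with
  | none => rw [hf] at h; simp at h
  | some p =>
    rw [hf] at h
    simp only [Option.map_some, Option.getD_some] at h
    have hp := List.mem_of_find?_eq_some hf
    fin_cases hp <;> simp_all [pvAllTools] <;> tauto

theorem pvGetD_vocab (c t : String) (h : t ∈ pvCatMap.getD c []) :
    t ∈ ["bash", "read", "edit", "write", "glob", "grep"] := by
  simp only [PySem.Dict.getD, PySem.Dict.get?, pvCatMap_items] at h
  cases hf : List.find? (fun p => p.1 == c)
      [("execute_bash", ["bash"]), ("fs_read", ["read"]), ("fs_write", ["edit", "write"]),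
       ("fs_list", ["glob", "grep"]), ("fs_*", ["read", "edit", "write", "glob", "grep"])] with
  | none => rw [hf] at h; simp at h
  | some p =>
    rw [hf] at h
    simp only [Option.map_some, Option.getD_some] at h
    have hp := List.mem_of_find?_eq_some hf
    fin_cases hp <;> simp_all <;> tauto

theorem pvPermitted_vocab (ats : List String) (t : String)
    (h : pvPermitted ats t = true) : t ∈ ["bash", "read", "edit", "write", "glob", "grep"] := by
  simp only [pvPermitted, List.any_eq_true] at h
  obtain ⟨e, _, he⟩ := h
  rw [List.contains_iff_mem] at he
  simp only [pvExpand, List.mem_flatMap] at he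
  obtain ⟨c, _, hc⟩ := he
  exact pvGetD_vocab c t hc

-- inserting a constant value for a list of existing keys, on items
theorem ins_tools (pv : String) (tools : List String) (d : PySem.Dict String String)
    (v : String → String) (hd : d.items = pvAllTools.map (fun t => (t, v t)))
    (hsub : ∀ t ∈ tools, t ∈ pvAllTools) :
    (tools.foldl (fun (d : PySem.Dict String String) tool => d.insert tool pv) d).items
    = pvAllTools.map (fun t => (t, if tools.contains t then pv else v t)) := by
  induction tools generalizing d v with
  | nil => simpa using hd
  | cons tool rest ih =>
    have hcont : d.contains tool = true := by
      rw [dict_contains_keys]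
      refine List.contains_iff_mem.mpr ?_
      simp only [PySem.Dict.keys, hd, List.map_map]
      simpa using hsub tool (by simp)
    have hitems : (d.insert tool pv).items
        = pvAllTools.map (fun t => (t, if t == tool then pv else v t)) := by
      rw [PySem.Dict.items_insert_of_contains d pv hcont, hd, List.map_map]
      refine List.map_congr_left ?_
      intro t _
      by_cases h : t == tool
      · have : t = tool := by simpa using h
        simp [h, this]
      · have hne : t ≠ tool := by simpa using h
        simp [h, hne]
    rw [List.foldl_cons, ih _ _ hitems (fun t ht => hsub t (by simp [ht]))]
    refine List.map_congr_left ?_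
    intro t _
    rw [List.contains_cons]
    by_cases h2 : t = tool
    · subst h2
      simp
    · have a2 : (t == tool) = false := by simpa using h2
      by_cases h1 : rest.contains t <;> simp [h1, a2]

-- B's inner loop for one entry's category list, on items
theorem cats_fold (pv : String) (cats : List String) (d : PySem.Dict String String)
    (v : String → String) (hd : d.items = pvAllTools.map (fun t => (t, v t))) :
    (cats.foldl (fun d category =>
        (pvCatMap.getD category []).foldl
          (fun (d : PySem.Dict String String) tool => d.insert tool pv) d) d).items
    = pvAllTools.map (fun t =>
        (t, if (cats.flatMap (fun c => pvCatMap.getD c [])).contains t then pv else v t)) := by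
  induction cats generalizing d v with
  | nil => simpa using hd
  | cons c cs ih =>
    rw [List.foldl_cons,
      ih _ _ (ins_tools pv (pvCatMap.getD c []) d v hd (fun t ht => pvGetD_sub c t ht))]
    refine List.map_congr_left ?_
    intro t _
    rw [List.flatMap_cons, List.contains_append]
    by_cases h1 : (cs.flatMap (fun c => pvCatMap.getD c [])).contains t <;>
      by_cases h2 : (pvCatMap.getD c []).contains t <;>
        simp_all [List.contains_iff_mem, List.mem_flatMap]

-- B's overwrite loop over allowed_tools, on items
theorem alt_loop_spec (ats : List String) (pv : String) (d : PySem.Dict String String)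
    (v : String → String) (hd : d.items = pvAllTools.map (fun t => (t, v t))) :
    ((ats.foldl (fun d entry =>
        (if entry == "@builtin" then ["execute_bash", "fs_read", "fs_write", "fs_list"]
         else [entry]).foldl (fun d category =>
          (pvCatMap.getD category []).foldl
            (fun (d : PySem.Dict String String) tool => d.insert tool pv) d) d) d)).items
    = pvAllTools.map (fun t => (t, if pvPermitted ats t then pv else v t)) := by
  induction ats generalizing d v with
  | nil => simpa [pvPermitted] using hd
  | cons e rest ih =>
    rw [List.foldl_cons]
    rw [ih _ _ (cats_fold pv _ d v hd)]
    refine List.map_congr_left ?_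
    intro t _
    have hperm : pvPermitted (e :: rest) t
        = ((pvExpand e).contains t || pvPermitted rest t) := by
      simp [pvPermitted, List.any_cons, Bool.or_comm]
    rw [hperm]
    by_cases h1 : pvPermitted rest t <;>
      by_cases h2 : (pvExpand e).contains t <;> simp_all [pvExpand]

-- A's per-tool classification (total form; the Option none branch never fires on pvAllTools)
def pvValA (P : PySem.Set String) (pv : String) (tool : String) : Option String :=
  if pvDeny.contains tool then some "deny"
  else if pvAllow.contains tool then some "allow"
  else if P.contains tool then some pv
  else if pvVocab.contains tool then some "deny"
  else none

def pvVA (P : PySem.Set String) (pv : String) (tool : String) : String :=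
  if pvDeny.contains tool then "deny"
  else if pvAllow.contains tool then "allow"
  else if P.contains tool then pv
  else "deny"

theorem pvVocab_eq : pvVocab = ["bash", "read", "edit", "write", "glob", "grep"] := by
  decide

theorem pvValA_covered (P : PySem.Set String) (pv : String) (t : String)
    (ht : t ∈ pvAllTools) : pvValA P pv t = some (pvVA P pv t) := by
  fin_cases ht <;>
    simp [pvValA, pvVA, pvDeny, pvAllow, pvVocab_eq, PySem.Set.contains] <;>
    split_ifs <;> try simp

theorem a_option_fold (P : PySem.Set String) (pv : String) (l : List String)
    (d : PySem.Dict String String) (hl : ∀ t ∈ l, pvValA P pv t = some (pvVA P pv t)) :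
    l.foldl (fun od tool =>
      match od with
      | none => none
      | some d =>
        if pvDeny.contains tool then some (d.insert tool "deny")
        else if pvAllow.contains tool then some (d.insert tool "allow")
        else if P.contains tool then some (d.insert tool pv)
        else if pvVocab.contains tool then some (d.insert tool "deny")
        else none) (some d)
    = some (l.foldl (fun d tool => d.insert tool (pvVA P pv tool)) d) := by
  induction l generalizing d with
  | nil => rfl
  | cons t rest ih =>
    have hv := hl t (by simp)
    rw [List.foldl_cons, List.foldl_cons]
    have hstep : (match (some d : Option (PySem.Dict String String)) with
      | none => none
      | some d =>
        if pvDeny.contains t then some (d.insert t "deny")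
        else if pvAllow.contains t then some (d.insert t "allow")
        else if P.contains t then some (d.insert t pv)
        else if pvVocab.contains t then some (d.insert t "deny")
        else none) = some (d.insert t (pvVA P pv t)) := by
      simp only [pvValA, pvVA] at hv ⊢
      split_ifs at hv ⊢ <;> simp_all
    rw [hstep, ih _ (fun t ht => hl t (by simp [ht]))]

-- ===== VERDICT (by name: the statement is the Claim_ definition above) =====
theorem cao_tools_to_opencode_permission_spec : Claim_equal_cao_tools_to_opencode_permission := by
  intro ats aa _
  unfold Spec_cao_tools_to_opencode_permission
  unfold cao_tools_to_opencode_permission cao_tools_to_opencode_permission_alt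
  by_cases h : ats.contains "*" = true
  · have hm : "*" ∈ ats := List.contains_iff_mem.mp h
    simp [hm]
  · simp only [h, Bool.false_eq_true, if_false]
    set P : PySem.Set String := ((ats.foldl (fun acc entry =>
        if entry == "@builtin" then
          acc ++ ["execute_bash", "fs_read", "fs_write", "fs_list"]
        else if PySem.Str.startswith entry "@" then acc
        else acc ++ [entry]) []).foldl (fun s category =>
          match pvCatMap.get? category with
          | some ts => PySem.Set.update s ts
          | none => s) PySem.Set.empty) with hP
    set pv : String := if aa then "allow" else "ask" with hpv
    rw [a_option_fold P pv pvAllTools PySem.Dict.empty (fun t ht => pvValA_covered P pv t ht)]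
    rw [Option.getD_some]
    have hfresh : (pvAllTools.foldl
        (fun (d : PySem.Dict String String) tool => d.insert tool (pvVA P pv tool))
        PySem.Dict.empty).items = pvAllTools.map (fun t => (t, pvVA P pv t)) := by
      have := PySem.Dict.items_foldl_insert_fresh (l := pvAllTools) (k := fun t => t)
        (v := fun t => pvVA P pv t) (d := PySem.Dict.empty)
        (by intro a _; rfl) (by simp; decide)
      simpa using this
    rw [hfresh]
    have hd0 : (pvAllTools.foldl
        (fun (d : PySem.Dict String String) tool => d.insert tool "deny")
        PySem.Dict.empty).items = pvAllTools.map (fun t => (t, "deny")) := by decide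
    rw [ins_tools "allow" pvAllowOrdered _ _ (alt_loop_spec ats pv _ _ hd0) (by decide)]
    refine List.map_congr_left ?_
    intro t ht
    have hPt : ∀ t : String, t ∈ P ↔ pvPermitted ats t = true := by
      intro t
      rw [← permitted_spec ats t]
      exact (List.contains_iff_mem).symm
    fin_cases ht <;>
      simp [pvVA, pvAllowOrdered, pvDeny, pvAllow, PySem.Set.contains, hPt] <;>
      (intro hp; exact absurd (pvPermitted_vocab ats _ hp) (by decide))
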